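-- pv_equiv track=rewrite | github.com/chesslogic/supercalc | tools/ingest_wikigg_attacks.py | get_primary_code
-- ===== SOURCE A (Python) =====
-- from typing import Any, Iterable
--
-- def get_primary_code(entity_obj: dict[str, Any], weapon_contexts: list[dict[str, Any]]) -> str | None:
--     entity_id = str(entity_obj.get("id") or "").strip()
--     if entity_id:
--         return entity_id
--
--     for context in reversed(weapon_contexts):
--         weapon_id = str(context.get("id") or "").strip()
--         if weapon_id:
--             return weapon_id
--
--     return None
-- ===== SOURCE B (Python) =====
-- def get_primary_code(entity_obj, weapon_contexts):
--     entity_id = str(entity_obj.get("id") or "").strip()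
--     if entity_id:
--         return entity_id
--     ids = [w for w in (str(c.get("id") or "").strip() for c in weapon_contexts) if w]
--     return ids[-1] if ids else None
-- ===== Notes on version B (the rewrite author's own statement) =====
-- stated objective: alternative
-- what changed: Replaced the reversed() early-exit scan by a forward comprehension that collects all normalized non-empty weapon ids and returns the last element of that list (or None).
import Mathlib
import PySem

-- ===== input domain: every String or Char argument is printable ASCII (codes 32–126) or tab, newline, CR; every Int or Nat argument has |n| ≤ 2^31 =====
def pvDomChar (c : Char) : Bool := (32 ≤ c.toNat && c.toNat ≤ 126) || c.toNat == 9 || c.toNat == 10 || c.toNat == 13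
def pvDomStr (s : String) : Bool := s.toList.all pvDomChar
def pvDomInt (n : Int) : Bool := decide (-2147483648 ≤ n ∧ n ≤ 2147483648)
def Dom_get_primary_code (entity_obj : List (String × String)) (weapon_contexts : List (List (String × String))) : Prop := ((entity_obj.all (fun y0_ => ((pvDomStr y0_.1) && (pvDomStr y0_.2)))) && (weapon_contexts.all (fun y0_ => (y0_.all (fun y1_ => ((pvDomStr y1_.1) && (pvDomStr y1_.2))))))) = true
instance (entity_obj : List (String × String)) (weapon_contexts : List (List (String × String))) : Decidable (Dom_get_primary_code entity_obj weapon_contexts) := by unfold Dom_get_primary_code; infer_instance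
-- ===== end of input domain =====

-- ===== PORT A =====
-- B changes the decomposition only: A's reversed early-exit scan becomes 'collect forward, take last'; no speed claim.
-- shared expression of both Pythons: str(c.get("id") or "").strip()  (dict lookup = first match on the assoc list)
def pvNormId (d : List (String × String)) : String :=
  PySem.Str.strip (((d.find? (fun p => p.1 == "id")).map (fun p => p.2)).getD "")

-- the 'for context in reversed(weapon_contexts): … return weapon_id' loop, early return = recursion stop
def pvLoopA : List (List (String × String)) → Option String
  | [] => none
  | c :: rest =>
    let weapon_id := pvNormId c
    if weapon_id ≠ "" then some weapon_id else pvLoopA rest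

def get_primary_code (entity_obj : List (String × String)) (weapon_contexts : List (List (String × String))) : Option String :=
  let entity_id := pvNormId entity_obj
  if entity_id ≠ "" then some entity_id
  else pvLoopA weapon_contexts.reverse

-- ===== PORT B =====
def get_primary_code_alt (entity_obj : List (String × String)) (weapon_contexts : List (List (String × String))) : Option String :=
  let entity_id := pvNormId entity_obj
  if entity_id ≠ "" then some entity_id
  else
    let ids := (weapon_contexts.map pvNormId).filter (fun w => w ≠ "")
    ids.getLast?

-- ===== PRECONDITION & SPEC =====
def Spec_get_primary_code (entity_obj : List (String × String)) (weapon_contexts : List (List (String × String))) (out : Option String) : Prop := out = get_primary_code_alt entity_obj weapon_contexts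
instance (entity_obj : List (String × String)) (weapon_contexts : List (List (String × String))) (out : Option String) : Decidable (Spec_get_primary_code entity_obj weapon_contexts out) := by unfold Spec_get_primary_code; infer_instance

-- ===== CLAIM (what is proved, stated in full; the proofs are below) =====
def Claim_equal_get_primary_code : Prop := ∀ (entity_obj : List (String × String)) (weapon_contexts : List (List (String × String))), Dom_get_primary_code entity_obj weapon_contexts → Spec_get_primary_code entity_obj weapon_contexts (get_primary_code entity_obj weapon_contexts)

-- ===== LEMMAS AND PROOFS =====
theorem pvLoopA_eq_head_filter (l : List (List (String × String))) :
    pvLoopA l = ((l.map pvNormId).filter (fun w => w ≠ "")).head? := by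
  induction l with
  | nil => rfl
  | cons c rest ih =>
    simp only [pvLoopA, List.map_cons, List.filter_cons]
    by_cases h : pvNormId c ≠ ""
    · simp [h]
    · simp [h, ih]

-- ===== VERDICT (by name: the statement is the Claim_ definition above) =====
theorem get_primary_code_spec : Claim_equal_get_primary_code := by
  intro entity_obj weapon_contexts _
  unfold Spec_get_primary_code get_primary_code get_primary_code_alt
  by_cases h : pvNormId entity_obj ≠ ""
  · simp [h]
  · simp only [h, pvLoopA_eq_head_filter]
    simp [← List.map_reverse]
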